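-- pv_equiv track=rewrite | github.com/GiraffeReversed/edulint | edulint/prepare_explanations/pylint_data/thonny_process_slim.py | make_explanation_more_friedly
-- ===== SOURCE A (Python) =====
-- def make_explanation_more_friedly(explanation: str) -> str:
--     replace_prefixes = {
--         "Used when an ": "It looks like the ",
--         "Used when a ": "It looks like the ",
--         "Used when ": "It looks like ",
--         "Emitted when an ": "It looks like the ",
--         "Emitted when a ": "It looks like the ",
--         "Emitted when ": "It looks like ",
--     }
--
--     for prefix, replacement in replace_prefixes.items():
--         if explanation.startswith(prefix):
--             explanation = replacement + explanation[len(prefix) :]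
--             break
--
--     return explanation
-- ===== SOURCE B (Python) =====
-- def make_explanation_more_friedly(explanation: str) -> str:
--     def rewrite(rest: str) -> str:
--         if rest.startswith("an "):
--             return "It looks like the " + rest[3:]
--         if rest.startswith("a "):
--             return "It looks like the " + rest[2:]
--         return "It looks like " + rest
--
--     if explanation.startswith("Used when "):
--         return rewrite(explanation[len("Used when "):])
--     if explanation.startswith("Emitted when "):
--         return rewrite(explanation[len("Emitted when "):])
--     return explanation
-- ===== Notes on version B (the rewrite author's own statement) =====
-- stated objective: simpler
-- what changed: Replaced the six-entry prefix dictionary scan with a two-stage decomposition: match the lead-in ('Used when '/'Emitted when ') first, then independently rewrite the article ('an '/'a ') on the remainder.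
import Mathlib
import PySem

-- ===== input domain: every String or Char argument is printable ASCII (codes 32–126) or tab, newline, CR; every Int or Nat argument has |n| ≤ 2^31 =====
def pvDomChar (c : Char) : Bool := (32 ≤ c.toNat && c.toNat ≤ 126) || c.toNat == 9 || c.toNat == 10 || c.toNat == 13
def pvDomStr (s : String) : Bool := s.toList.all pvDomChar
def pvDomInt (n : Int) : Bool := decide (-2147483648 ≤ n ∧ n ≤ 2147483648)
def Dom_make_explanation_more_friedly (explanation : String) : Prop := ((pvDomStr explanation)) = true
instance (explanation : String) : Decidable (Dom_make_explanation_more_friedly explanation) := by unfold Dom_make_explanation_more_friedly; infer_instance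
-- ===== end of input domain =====

-- ===== PORT A =====
def replace_prefixes : List (String × String) :=
  [("Used when an ", "It looks like the "),
   ("Used when a ", "It looks like the "),
   ("Used when ", "It looks like "),
   ("Emitted when an ", "It looks like the "),
   ("Emitted when a ", "It looks like the "),
   ("Emitted when ", "It looks like ")]

-- the for-loop with break over replace_prefixes.items()
def mefLoop : List (String × String) → String → String
  | [], explanation => explanation
  | (prefixS, replacement) :: rest, explanation =>
    if PySem.Str.startswith explanation prefixS then
      replacement ++ PySem.Str.slice explanation (some (PySem.Str.len prefixS : Int)) none
    else mefLoop rest explanation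

def make_explanation_more_friedly (explanation : String) : String :=
  mefLoop replace_prefixes explanation


-- ===== PORT B =====
-- helper: the article rewrite on the text after the lead-in
def mefRewrite (rest : String) : String :=
  if PySem.Str.startswith rest "an " then
    "It looks like the " ++ PySem.Str.slice rest (some 3) none
  else if PySem.Str.startswith rest "a " then
    "It looks like the " ++ PySem.Str.slice rest (some 2) none
  else "It looks like " ++ rest

def make_explanation_more_friedly_alt (explanation : String) : String :=
  if PySem.Str.startswith explanation "Used when " then
    mefRewrite (PySem.Str.slice explanation (some 10) none)
  else if PySem.Str.startswith explanation "Emitted when " then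
    mefRewrite (PySem.Str.slice explanation (some 13) none)
  else explanation


-- ===== PRECONDITION & SPEC =====
def Spec_make_explanation_more_friedly (explanation : String) (out : String) : Prop := out = make_explanation_more_friedly_alt explanation
instance (explanation : String) (out : String) : Decidable (Spec_make_explanation_more_friedly explanation out) := by unfold Spec_make_explanation_more_friedly; infer_instance

-- ===== CLAIM (what is proved, stated in full; the proofs are below) =====
def Claim_equal_make_explanation_more_friedly : Prop := ∀ (explanation : String), Dom_make_explanation_more_friedly explanation → Spec_make_explanation_more_friedly explanation (make_explanation_more_friedly explanation)

-- ===== LEMMAS AND PROOFS =====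

-- l1 ++ l2 is a prefix of s iff l1 is, and l2 is a prefix of what remains
theorem prefix_append_iff {α : Type} (l1 l2 s : List α) :
    (l1 ++ l2) <+: s ↔ l1 <+: s ∧ l2 <+: s.drop l1.length := by
  constructor
  · rintro ⟨t, rfl⟩
    exact ⟨⟨l2 ++ t, by simp⟩, ⟨t, by simp⟩⟩
  · rintro ⟨⟨t, rfl⟩, h2⟩
    rw [List.drop_left] at h2
    obtain ⟨u, rfl⟩ := h2
    exact ⟨u, by simp⟩

theorem string_eq_of_toList {a b : String} (h : a.toList = b.toList) : a = b := by
  simpa using congrArg String.ofList h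

theorem sw_iff (s p : String) :
    PySem.Str.startswith s p = true ↔ p.toList <+: s.toList := by
  simp [PySem.Chars.startswith_iff]

theorem sw_split (e r p q : String) (n : Nat) (hr : r = p ++ q) (hn : p.toList.length = n) :
    PySem.Str.startswith e r = true ↔
      (p.toList <+: e.toList ∧ q.toList <+: e.toList.drop n) := by
  subst hr
  rw [sw_iff]
  have h : (p ++ q).toList = p.toList ++ q.toList := by simp
  rw [h, prefix_append_iff, hn]

theorem slice_dropN (xs : List Char) (k : Int) (hk : 0 ≤ k) :
    PySem.List.slice xs (some k) none = xs.drop k.toNat :=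
  PySem.List.slice_from xs hk

theorem sw_slice10 (e q : String) :
    PySem.Str.startswith (PySem.Str.slice e (some 10) none) q = true ↔
      q.toList <+: e.toList.drop 10 := by
  rw [sw_iff]
  simp [slice_dropN _ (10:Int) (by norm_num)]

theorem sw_slice13 (e q : String) :
    PySem.Str.startswith (PySem.Str.slice e (some 13) none) q = true ↔
      q.toList <+: e.toList.drop 13 := by
  rw [sw_iff]
  simp [slice_dropN _ (13:Int) (by norm_num)]

theorem make_explanation_more_friedly_eq (e : String) :
    make_explanation_more_friedly e = make_explanation_more_friedly_alt e := by
  have sUan := sw_split e "Used when an " "Used when " "an " 10 (by decide) (by decide)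
  have sUa  := sw_split e "Used when a " "Used when " "a " 10 (by decide) (by decide)
  have sEan := sw_split e "Emitted when an " "Emitted when " "an " 13 (by decide) (by decide)
  have sEa  := sw_split e "Emitted when a " "Emitted when " "a " 13 (by decide) (by decide)
  simp only [make_explanation_more_friedly, make_explanation_more_friedly_alt, mefLoop, replace_prefixes, mefRewrite]
  by_cases hU : "Used when ".toList <+: e.toList
  · -- "Used when " matches; A's first three entries vs B's first lead-in
    by_cases han : "an ".toList <+: e.toList.drop 10
    · simp only [sUan.mpr ⟨hU, han⟩, (sw_iff e "Used when ").mpr hU,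
        (sw_slice10 e "an ").mpr han, if_true]
      apply string_eq_of_toList
      simp [slice_dropN _ (13:Int) (by norm_num), slice_dropN _ (10:Int) (by norm_num),
        slice_dropN _ (3:Int) (by norm_num), PySem.Str.len]
    · have hUanF : PySem.Str.startswith e "Used when an " = false := by
        rw [Bool.eq_false_iff]; intro h; exact han (sUan.mp h).2
      have hanF : PySem.Str.startswith (PySem.Str.slice e (some 10) none) "an " = false := by
        rw [Bool.eq_false_iff]; intro h; exact han ((sw_slice10 e "an ").mp h)
      by_cases ha : "a ".toList <+: e.toList.drop 10
      · simp only [hUanF, sUa.mpr ⟨hU, ha⟩, (sw_iff e "Used when ").mpr hU, hanF,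
          (sw_slice10 e "a ").mpr ha, Bool.false_eq_true, if_false, if_true]
        apply string_eq_of_toList
        simp [slice_dropN _ (12:Int) (by norm_num), slice_dropN _ (10:Int) (by norm_num),
          slice_dropN _ (2:Int) (by norm_num), PySem.Str.len]
      · have hUaF : PySem.Str.startswith e "Used when a " = false := by
          rw [Bool.eq_false_iff]; intro h; exact ha (sUa.mp h).2
        have haF : PySem.Str.startswith (PySem.Str.slice e (some 10) none) "a " = false := by
          rw [Bool.eq_false_iff]; intro h; exact ha ((sw_slice10 e "a ").mp h)
        simp only [hUanF, hUaF, (sw_iff e "Used when ").mpr hU, hanF, haF, Bool.false_eq_true, if_false, if_true]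
        apply string_eq_of_toList
        simp [slice_dropN _ (10:Int) (by norm_num), PySem.Str.len]
  · -- "Used when " does not match: A's first three entries all fail, B's first lead-in fails
    have hUF : PySem.Str.startswith e "Used when " = false := by
      rw [Bool.eq_false_iff]; intro h; exact hU ((sw_iff e "Used when ").mp h)
    have hUanF : PySem.Str.startswith e "Used when an " = false := by
      rw [Bool.eq_false_iff]; intro h; exact hU (sUan.mp h).1
    have hUaF : PySem.Str.startswith e "Used when a " = false := by
      rw [Bool.eq_false_iff]; intro h; exact hU (sUa.mp h).1
    simp only [hUanF, hUaF, hUF, Bool.false_eq_true, if_false]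
    by_cases hE : "Emitted when ".toList <+: e.toList
    · by_cases han : "an ".toList <+: e.toList.drop 13
      · simp only [sEan.mpr ⟨hE, han⟩, (sw_iff e "Emitted when ").mpr hE,
          (sw_slice13 e "an ").mpr han, if_true]
        apply string_eq_of_toList
        simp [slice_dropN _ (16:Int) (by norm_num), slice_dropN _ (13:Int) (by norm_num),
          slice_dropN _ (3:Int) (by norm_num), PySem.Str.len]
      · have hEanF : PySem.Str.startswith e "Emitted when an " = false := by
          rw [Bool.eq_false_iff]; intro h; exact han (sEan.mp h).2
        have hanF : PySem.Str.startswith (PySem.Str.slice e (some 13) none) "an " = false := by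
          rw [Bool.eq_false_iff]; intro h; exact han ((sw_slice13 e "an ").mp h)
        by_cases ha : "a ".toList <+: e.toList.drop 13
        · simp only [hEanF, sEa.mpr ⟨hE, ha⟩, (sw_iff e "Emitted when ").mpr hE, hanF,
            (sw_slice13 e "a ").mpr ha, Bool.false_eq_true, if_false, if_true]
          apply string_eq_of_toList
          simp [slice_dropN _ (15:Int) (by norm_num), slice_dropN _ (13:Int) (by norm_num),
            slice_dropN _ (2:Int) (by norm_num), PySem.Str.len]
        · have hEaF : PySem.Str.startswith e "Emitted when a " = false := by
            rw [Bool.eq_false_iff]; intro h; exact ha (sEa.mp h).2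
          have haF : PySem.Str.startswith (PySem.Str.slice e (some 13) none) "a " = false := by
            rw [Bool.eq_false_iff]; intro h; exact ha ((sw_slice13 e "a ").mp h)
          simp only [hEanF, hEaF, (sw_iff e "Emitted when ").mpr hE, hanF, haF, Bool.false_eq_true, if_false, if_true]
          apply string_eq_of_toList
          simp [slice_dropN _ (13:Int) (by norm_num), PySem.Str.len]
    · have hEF : PySem.Str.startswith e "Emitted when " = false := by
        rw [Bool.eq_false_iff]; intro h; exact hE ((sw_iff e "Emitted when ").mp h)
      have hEanF : PySem.Str.startswith e "Emitted when an " = false := by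
        rw [Bool.eq_false_iff]; intro h; exact hE (sEan.mp h).1
      have hEaF : PySem.Str.startswith e "Emitted when a " = false := by
        rw [Bool.eq_false_iff]; intro h; exact hE (sEa.mp h).1
      simp only [hEanF, hEaF, hEF, Bool.false_eq_true, if_false]

-- ===== VERDICT (by name: the statement is the Claim_ definition above) =====
theorem make_explanation_more_friedly_spec : Claim_equal_make_explanation_more_friedly := by
  intro explanation _
  exact make_explanation_more_friedly_eq explanation
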